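-- pv_equiv track=rewrite | github.com/ArlenPP/data_mining_hw1 | apriori.py | exclude
-- ===== SOURCE A (Python) =====
-- def exclude(itemsets, target):
--     itemsets_exclude = itemsets[:]
--     if target == []:
--         return itemsets_exclude
--     delete_list = []
--     for i in range(0, len(itemsets_exclude)):
--         for j in range(0, len(target)):
--             if set(target[j]).issubset(set(itemsets_exclude[i])):
--                 delete_list.append(i)
--                 break
--     for index in sorted(delete_list, reverse=True):
--         del itemsets_exclude[index]
--     return itemsets_exclude
-- ===== SOURCE B (Python) =====
-- def exclude(itemsets, target):
--     return [it for it in itemsets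
--             if not any(set(t).issubset(set(it)) for t in target)]
-- ===== Notes on version B (the rewrite author's own statement) =====
-- stated objective: simpler
-- what changed: Replaces the two-phase collect-delete-indices-then-del-in-reverse machinery (plus the empty-target early return) with a single positive filtering pass that keeps each itemset iff no target is a subset of it.
import Mathlib
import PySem

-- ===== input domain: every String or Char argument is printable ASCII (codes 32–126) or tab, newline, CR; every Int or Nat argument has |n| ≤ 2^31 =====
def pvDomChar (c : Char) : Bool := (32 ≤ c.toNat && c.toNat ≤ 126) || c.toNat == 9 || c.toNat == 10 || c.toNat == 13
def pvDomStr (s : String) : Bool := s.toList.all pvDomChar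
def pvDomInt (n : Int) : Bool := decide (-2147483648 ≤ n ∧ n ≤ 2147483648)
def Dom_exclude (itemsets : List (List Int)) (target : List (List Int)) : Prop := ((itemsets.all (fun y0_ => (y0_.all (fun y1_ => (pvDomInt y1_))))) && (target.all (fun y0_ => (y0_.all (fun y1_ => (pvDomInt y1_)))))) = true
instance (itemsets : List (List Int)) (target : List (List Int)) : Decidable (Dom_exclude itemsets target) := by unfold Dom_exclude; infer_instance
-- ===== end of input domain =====

-- B replaces A's collect-indices-then-delete-in-reverse two-phase machinery with one
-- positive filtering pass (objective: simpler); return value only, neither mutates inputs.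

-- ===== PORT A =====
-- set(t).issubset(set(it))
def pySubset (t it : List Int) : Bool :=
  PySem.Set.issubset (PySem.Set.ofList t) (PySem.Set.ofList it)

def exclude (itemsets : List (List Int)) (target : List (List Int)) : List (List Int) :=
  -- itemsets_exclude = itemsets[:]
  let itemsets_exclude := itemsets
  if target = [] then itemsets_exclude
  else
    -- for i in range(len(...)): for j in range(len(target)): if subset: append i; break
    let delete_list : List Nat :=
      (List.range itemsets_exclude.length).foldl
        (fun acc i =>
          if target.any (fun t => pySubset t (itemsets_exclude.getD i [])) then
            acc ++ [i]
          else acc) []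
    -- for index in sorted(delete_list, reverse=True): del itemsets_exclude[index]
    (PySem.List.sorted delete_list (fun x => x) true).foldl
      (fun xs idx => xs.eraseIdx idx) itemsets_exclude

-- ===== PORT B =====
def exclude_alt (itemsets : List (List Int)) (target : List (List Int)) : List (List Int) :=
  itemsets.filter (fun it => !(target.any (fun t => pySubset t it)))

-- ===== PRECONDITION & SPEC =====
def Spec_exclude (itemsets : List (List Int)) (target : List (List Int)) (out : List (List Int)) : Prop := out = exclude_alt itemsets target
instance (itemsets : List (List Int)) (target : List (List Int)) (out : List (List Int)) : Decidable (Spec_exclude itemsets target out) := by unfold Spec_exclude; infer_instance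

-- ===== CLAIM (what is proved, stated in full; the proofs are below) =====
def Claim_equal_exclude : Prop := ∀ (itemsets : List (List Int)) (target : List (List Int)), Dom_exclude itemsets target → Spec_exclude itemsets target (exclude itemsets target)

-- ===== LEMMAS AND PROOFS =====

-- deleting shifted indices leaves the head untouched
theorem foldl_eraseIdx_map_succ {α : Type} (l : List Nat) (x : α) (xs : List α) :
    (l.map Nat.succ).foldl (fun ys i => ys.eraseIdx i) (x :: xs)
      = x :: l.foldl (fun ys i => ys.eraseIdx i) xs := by
  induction l generalizing xs with
  | nil => rfl
  | cons i l ih => simp [List.foldl_cons, List.eraseIdx_cons_succ, ih]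

-- deleting, back to front, exactly the positions whose element satisfies q is filtering ¬q
theorem eraseDesc_eq_filter (q : List Int → Bool) (xs : List (List Int)) :
    (((List.range xs.length).filter (fun i => q (xs.getD i []))).reverse).foldl
        (fun ys i => ys.eraseIdx i) xs
      = xs.filter (fun y => !q y) := by
  induction xs with
  | nil => rfl
  | cons x xs ih =>
    have hmap : (List.range (xs.length + 1)).filter (fun i => q ((x :: xs).getD i []))
        = (if q x then [0] else [])
          ++ ((List.range xs.length).filter (fun i => q (xs.getD i []))).map Nat.succ := by
      rw [List.range_succ_eq_map, List.filter_cons, List.filter_map]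
      cases hq : q x <;> simp_all [Function.comp_def, List.getElem?_cons_succ]
    rw [List.length_cons, hmap, List.reverse_append, ← List.map_reverse,
        List.foldl_append, foldl_eraseIdx_map_succ, ih]
    cases hq : q x <;> simp [hq]

theorem sortedDel_eq_filter (q : List Int → Bool) (xs : List (List Int)) :
    (PySem.List.sorted
        ((List.range xs.length).foldl
          (fun acc i => if q (xs.getD i []) then acc ++ [i] else acc) [])
        (fun x => x) true).foldl (fun ys i => ys.eraseIdx i) xs
      = xs.filter (fun y => !q y) := by
  have hdel : (List.range xs.length).foldl
      (fun acc i => if q (xs.getD i []) then acc ++ [i] else acc) []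
      = (List.range xs.length).filter (fun i => q (xs.getD i [])) := by
    have h := PySem.List.foldl_append_if_eq_filter
      (fun i => q (xs.getD i [])) (List.range xs.length) []
    rwa [List.nil_append] at h
  have hpw : ((List.range xs.length).filter
      (fun i => q (xs.getD i []))).Pairwise (· < ·) :=
    List.Pairwise.sublist List.filter_sublist List.pairwise_lt_range
  have hsorted : PySem.List.sorted
      ((List.range xs.length).filter (fun i => q (xs.getD i [])))
      (fun x => x) true
      = ((List.range xs.length).filter (fun i => q (xs.getD i []))).reverse :=
    PySem.List.sorted_rev_eq_of_perm_of_pairwise_gt _ _ _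
      (List.reverse_perm _) (by simpa using (List.pairwise_reverse).2 hpw)
  rw [hdel, hsorted]
  exact eraseDesc_eq_filter q xs

theorem exclude_eq (itemsets target : List (List Int)) :
    exclude itemsets target = exclude_alt itemsets target := by
  unfold exclude exclude_alt
  by_cases htgt : target = []
  · subst htgt
    simp
  · rw [if_neg htgt]
    exact sortedDel_eq_filter (fun it => target.any fun t => pySubset t it) itemsets

-- ===== VERDICT (by name: the statement is the Claim_ definition above) =====
theorem exclude_spec : Claim_equal_exclude := by
  intro itemsets target _
  exact exclude_eq itemsets target
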